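-- pv_equiv track=rewrite | github.com/adriansahlman/marsh | marsh/path.py | escape_field
-- ===== SOURCE A (Python) =====
-- def escape_field(
--     field: str,
--     delimiter: str = '.',
-- ) -> str:
--     """Escape all delimiters and quotes found in a field.
--
--     This may be done to maintain the original field when it becomes
--     part of a path that is later split back into fields.
--
--     Arguments:
--         field: The field to escape characters in.
--         delimiter: The delimiter used.
--
--     Returns:
--         The escaped field.
--     """
--     chars = []
--     for char in field:
--         if char in ('"', "'", '\\', delimiter):
--             chars.append('\\')
--         chars.append(char)
--     return ''.join(chars)
-- ===== SOURCE B (Python) =====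
-- def escape_field(
--     field: str,
--     delimiter: str = '.',
-- ) -> str:
--     table = {'"': '\\"', "'": "\\'", '\\': '\\\\'}
--     if len(delimiter) == 1:
--         table[delimiter] = '\\' + delimiter
--     return field.translate(str.maketrans(table))
-- ===== Notes on version B (the rewrite author's own statement) =====
-- stated objective: faster
-- what changed: B precomputes a char-to-replacement translation table (escaping quotes, backslash, and a single-char delimiter) and applies it in one table-driven pass via str.translate, instead of A's explicit Python loop with a membership test and list appends.
import Mathlib
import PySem

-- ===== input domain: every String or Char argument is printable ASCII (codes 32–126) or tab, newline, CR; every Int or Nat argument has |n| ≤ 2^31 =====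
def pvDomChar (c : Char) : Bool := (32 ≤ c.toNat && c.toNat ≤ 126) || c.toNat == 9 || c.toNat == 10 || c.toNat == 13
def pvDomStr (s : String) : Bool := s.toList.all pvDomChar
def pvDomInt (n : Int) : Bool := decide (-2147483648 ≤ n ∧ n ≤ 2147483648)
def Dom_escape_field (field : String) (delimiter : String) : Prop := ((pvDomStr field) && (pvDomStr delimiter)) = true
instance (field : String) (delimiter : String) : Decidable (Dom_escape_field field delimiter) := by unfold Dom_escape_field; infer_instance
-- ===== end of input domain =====

-- B is a table-driven one-pass rewrite (str.translate over a precomputed escape table), measured faster than A in a timing run; proved equal to A on all inputs.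

-- ===== PORT A =====
-- Literal port of A: loop over the chars, prepend '\' when the char is '"', '\'', '\\' or equals the delimiter string.
def escape_field (field : String) (delimiter : String) : String :=
  let chars := field.toList.foldl
    (fun acc c =>
      if c = '"' ∨ c = '\'' ∨ c = '\\' ∨ c.toString = delimiter then acc ++ ['\\', c]
      else acc ++ [c]) []
  String.ofList chars

-- ===== PORT B =====
-- the translation table: quotes and backslash always; the delimiter only when it is a single character
def escapeTable (delimiter : String) : PySem.Dict Char String :=
  let t := (((PySem.Dict.empty).insert '"' "\\\"").insert '\'' "\\'").insert '\\' "\\\\"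
  match delimiter.toList with
  | [d] => t.insert d ("\\" ++ delimiter)
  | _ => t

-- str.translate: each char is replaced by its table entry, or kept as itself
def escape_field_alt (field : String) (delimiter : String) : String :=
  String.ofList (field.toList.flatMap (fun c => (((escapeTable delimiter).get? c).getD c.toString).toList))

-- ===== PRECONDITION & SPEC =====
def Spec_escape_field (field : String) (delimiter : String) (out : String) : Prop := out = escape_field_alt field delimiter
instance (field : String) (delimiter : String) (out : String) : Decidable (Spec_escape_field field delimiter out) := by unfold Spec_escape_field; infer_instance

-- ===== CLAIM (what is proved, stated in full; the proofs are below) =====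
def Claim_equal_escape_field : Prop := ∀ (field : String) (delimiter : String), Dom_escape_field field delimiter → Spec_escape_field field delimiter (escape_field field delimiter)

-- ===== LEMMAS AND PROOFS =====

lemma toString_eq_iff (c : Char) (s : String) : c.toString = s ↔ [c] = s.toList := by
  rw [← String.toList_inj]; simp

-- per-character agreement between A's branch and B's table lookup
lemma perchar (delimiter : String) (c : Char) :
    (if c = '"' ∨ c = '\'' ∨ c = '\\' ∨ c.toString = delimiter then ['\\', c] else [c])
      = (((escapeTable delimiter).get? c).getD c.toString).toList := by
  unfold escapeTable
  rcases hd : delimiter.toList with _ | ⟨d, _ | ⟨d', rest⟩⟩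
  · simp only [toString_eq_iff, hd]
    simp [PySem.Dict.get?_insert]
    split_ifs <;> simp_all
  · simp only [toString_eq_iff, hd]
    simp [PySem.Dict.get?_insert]
    split_ifs <;> simp_all
  · simp only [toString_eq_iff, hd]
    simp [PySem.Dict.get?_insert]
    split_ifs <;> simp_all

-- ===== VERDICT (by name: the statement is the Claim_ definition above) =====
theorem escape_field_spec : Claim_equal_escape_field := by
  intro field delimiter _
  unfold Spec_escape_field escape_field escape_field_alt
  have hfun : (fun (acc : List Char) c =>
      if c = '"' ∨ c = '\'' ∨ c = '\\' ∨ c.toString = delimiter then acc ++ ['\\', c]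
      else acc ++ [c])
      = fun acc c => acc ++ (if c = '"' ∨ c = '\'' ∨ c = '\\' ∨ c.toString = delimiter then ['\\', c] else [c]) := by
    funext acc c; split <;> rfl
  simp only [hfun, PySem.List.foldl_append_eq_flatMap, List.nil_append]
  congr 1
  exact List.flatMap_congr (fun c _ => perchar delimiter c)
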